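-- pv_equiv track=rewrite | github.com/lowspeclabs/SmallCTL | src/smallctl/graph/model_stream_loop_rendering.py | _split_partial_tag_suffix
-- ===== SOURCE A (Python) =====
-- def _split_partial_tag_suffix(text: str, candidate_tags: list[str]) -> tuple[str, str]:
--     if not text:
--         return "", ""
--     max_suffix = min(len(text), max((len(tag) for tag in candidate_tags), default=0) - 1)
--     lowered = text.lower()
--     for length in range(max_suffix, 0, -1):
--         suffix = lowered[-length:]
--         if any(tag.startswith(suffix) for tag in candidate_tags):
--             return text[:-length], text[-length:]
--     return text, ""
-- ===== SOURCE B (Python) =====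
-- def _split_partial_tag_suffix(text: str, candidate_tags: list[str]) -> tuple[str, str]:
--     if not text:
--         return "", ""
--     cap = min(len(text), max((len(tag) for tag in candidate_tags), default=0) - 1)
--     lowered = text.lower()
--     best = 0
--     for tag in candidate_tags:
--         for length in range(min(cap, len(tag)), 0, -1):
--             if tag[:length] == lowered[len(lowered) - length:]:
--                 if length > best:
--                     best = length
--                 break
--     if best > 0:
--         return text[:-best], text[-best:]
--     return text, ""
-- ===== Notes on version B (the rewrite author's own statement) =====
-- stated objective: alternative
-- what changed: Loop nesting flipped: instead of scanning suffix lengths descending and asking whether any tag matches, B iterates over each tag once, finds that tag's largest matching overlap length, and keeps the maximum across tags.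
import Mathlib
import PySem

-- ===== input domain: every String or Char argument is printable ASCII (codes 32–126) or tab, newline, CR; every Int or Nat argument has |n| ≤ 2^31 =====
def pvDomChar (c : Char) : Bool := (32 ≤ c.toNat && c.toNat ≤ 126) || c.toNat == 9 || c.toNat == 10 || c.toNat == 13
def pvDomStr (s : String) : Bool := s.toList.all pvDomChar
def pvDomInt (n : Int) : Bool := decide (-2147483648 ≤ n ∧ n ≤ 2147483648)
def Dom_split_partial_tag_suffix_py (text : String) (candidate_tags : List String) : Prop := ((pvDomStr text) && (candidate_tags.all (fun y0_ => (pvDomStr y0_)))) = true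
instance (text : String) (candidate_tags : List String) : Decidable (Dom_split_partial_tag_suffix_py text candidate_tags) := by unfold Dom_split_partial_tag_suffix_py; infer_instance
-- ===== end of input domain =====

-- B flips the loop nesting: per-tag largest overlap, maximum across tags (objective: alternative decomposition).

-- shared return expression: (text[:-m], text[-m:]) for 1 ≤ m ≤ len(text)
-- (exact: for such m, text[:-m] = take (len-m) and text[-m:] = drop (len-m))
def pvSplitAt (text : String) (m : Nat) : String × String :=
  (String.ofList (text.toList.take (text.toList.length - m)),
   String.ofList (text.toList.drop (text.toList.length - m)))

-- ===== PORT A =====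
-- the loop 'for length in range(max_suffix, 0, -1)': state is the current length (= n);
-- suffix = lowered[-length:] = drop (len - length), exact since 1 ≤ length
def pvALoop (text : String) (candidate_tags : List String) (lowered : List Char) : Nat → String × String
  | 0 => (text, "")
  | (k+1) =>
    let suffix := lowered.drop (lowered.length - (k+1))
    if candidate_tags.any (fun tag => PySem.Chars.startswith tag.toList suffix) then
      pvSplitAt text (k+1)
    else pvALoop text candidate_tags lowered k

def split_partial_tag_suffix_py (text : String) (candidate_tags : List String) : String × String :=
  if text.toList = [] then ("", "")
  else
    let maxTagLen : Int := ((candidate_tags.map (fun t => (t.toList.length : Int))).max?).getD 0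
    let max_suffix : Int := min (text.toList.length : Int) (maxTagLen - 1)
    let lowered := PySem.Chars.lower text.toList
    -- range(max_suffix, 0, -1) runs max_suffix, …, 1 and is empty for max_suffix ≤ 0: exactly pvALoop at max_suffix.toNat
    pvALoop text candidate_tags lowered max_suffix.toNat

-- ===== PORT B =====
-- inner loop of Source B: 'for length in range(min(cap, len(tag)), 0, -1): if tag[:length] == lowered[-length:]: … break'
-- returns the first (largest) matching length, 0 if none
def pvTagBest (tag lowered : List Char) : Nat → Nat
  | 0 => 0
  | (k+1) =>
    if tag.take (k+1) = lowered.drop (lowered.length - (k+1)) then (k+1)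
    else pvTagBest tag lowered k

def split_partial_tag_suffix_py_alt (text : String) (candidate_tags : List String) : String × String :=
  if text.toList = [] then ("", "")
  else
    let cap : Int := min (text.toList.length : Int)
      (((candidate_tags.map (fun t => (t.toList.length : Int))).max?).getD 0 - 1)
    let lowered := PySem.Chars.lower text.toList
    -- 'if length > best: best = length' with break = max of per-tag first match
    let best := candidate_tags.foldl
      (fun b tag => max b (pvTagBest tag.toList lowered (min cap (tag.toList.length : Int)).toNat)) 0
    if 0 < best then pvSplitAt text best else (text, "")

-- ===== PRECONDITION & SPEC =====
def Spec_split_partial_tag_suffix_py (text : String) (candidate_tags : List String) (out : String × String) : Prop := out = split_partial_tag_suffix_py_alt text candidate_tags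
instance (text : String) (candidate_tags : List String) (out : String × String) : Decidable (Spec_split_partial_tag_suffix_py text candidate_tags out) := by unfold Spec_split_partial_tag_suffix_py; infer_instance

-- ===== CLAIM (what is proved, stated in full; the proofs are below) =====
def Claim_equal_split_partial_tag_suffix_py : Prop := ∀ (text : String) (candidate_tags : List String), Dom_split_partial_tag_suffix_py text candidate_tags → Spec_split_partial_tag_suffix_py text candidate_tags (split_partial_tag_suffix_py text candidate_tags)

-- ===== LEMMAS AND PROOFS =====

-- greatest m ≤ n with f m = true (0 if none): the common skeleton of both loops
def pvGB (f : Nat → Bool) : Nat → Nat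
  | 0 => 0
  | (k+1) => if f (k+1) then (k+1) else pvGB f k

theorem pvGB_le (f : Nat → Bool) (n : Nat) : pvGB f n ≤ n := by
  induction n with
  | zero => simp [pvGB]
  | succ k ih => simp only [pvGB]; split <;> omega

theorem pvGB_spec (f : Nat → Bool) (n : Nat) : pvGB f n = 0 ∨ f (pvGB f n) = true := by
  induction n with
  | zero => simp [pvGB]
  | succ k ih => simp only [pvGB]; split <;> simp_all

theorem pvGB_ge (f : Nat → Bool) (n m : Nat) (h1 : 1 ≤ m) (h2 : m ≤ n) (hf : f m = true) :
    m ≤ pvGB f n := by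
  induction n with
  | zero => omega
  | succ k ih =>
    simp only [pvGB]; split
    · omega
    · rename_i hk
      rcases Nat.lt_or_ge m (k+1) with h | h
      · exact ih (by omega)
      · have hm : m = k+1 := by omega
        rw [hm] at hf; exact absurd hf hk

theorem pvGB_congr (f g : Nat → Bool) (n : Nat) (h : ∀ m, 1 ≤ m → m ≤ n → f m = g m) :
    pvGB f n = pvGB g n := by
  induction n with
  | zero => rfl
  | succ k ih =>
    simp only [pvGB, h (k+1) (by omega) (le_refl _)]
    split <;> [rfl; exact ih (fun m h1 h2 => h m h1 (by omega))]

theorem pvGB_false (n : Nat) : pvGB (fun _ => false) n = 0 := by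
  induction n with
  | zero => rfl
  | succ k ih => simpa [pvGB] using ih

-- A's loop computes pvGB of its any-tag test
theorem pvALoop_eq (text : String) (tags : List String) (lowered : List Char) (n : Nat) :
    pvALoop text tags lowered n =
      (if pvGB (fun m => tags.any
            (fun tag => PySem.Chars.startswith tag.toList (lowered.drop (lowered.length - m)))) n = 0
       then (text, "")
       else pvSplitAt text (pvGB (fun m => tags.any
            (fun tag => PySem.Chars.startswith tag.toList (lowered.drop (lowered.length - m)))) n)) := by
  induction n with
  | zero => simp [pvALoop, pvGB]
  | succ k ih =>
    simp only [pvALoop, pvGB]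
    split <;> simp_all

-- B's inner loop is pvGB of its equality test
theorem pvTagBest_eq (tag lowered : List Char) (n : Nat) :
    pvTagBest tag lowered n =
      pvGB (fun m => decide (tag.take m = lowered.drop (lowered.length - m))) n := by
  induction n with
  | zero => rfl
  | succ k ih => simp only [pvTagBest, pvGB, decide_eq_true_eq]; split <;> simp_all

-- a match of length m (1 ≤ m ≤ len lowered) forces m ≤ len tag
theorem pvMatch_len (tag lowered : List Char) (m : Nat) (h1 : 1 ≤ m) (hm : m ≤ lowered.length)
    (h : tag.take m = lowered.drop (lowered.length - m)) : m ≤ tag.length := by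
  have := congrArg List.length h
  simp [List.length_take, List.length_drop] at this
  omega

-- startswith test ↔ take-equality test, for 1 ≤ m ≤ len lowered
theorem pvTest_iff (tag lowered : List Char) (m : Nat) (h1 : 1 ≤ m) (hm : m ≤ lowered.length) :
    PySem.Chars.startswith tag (lowered.drop (lowered.length - m)) =
      decide (tag.take m = lowered.drop (lowered.length - m)) := by
  have hlen : (lowered.drop (lowered.length - m)).length = m := by
    simp [List.length_drop]; omega
  rcases h : PySem.Chars.startswith tag (lowered.drop (lowered.length - m)) with _ | _
  · rw [eq_comm, decide_eq_false_iff_not]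
    intro he
    have : lowered.drop (lowered.length - m) <+: tag := by
      rw [← he]; exact ⟨tag.drop m, by simp⟩
    rw [← PySem.Chars.startswith_iff] at this
    simp [h] at this
  · rw [eq_comm, decide_eq_true_eq]
    have hp : lowered.drop (lowered.length - m) <+: tag :=
      (PySem.Chars.startswith_iff tag _).mp h
    have := List.prefix_iff_eq_take.mp hp
    rw [hlen] at this
    exact this.symm

-- the key step: max of per-tag greatest matches = greatest any-tag match
theorem pvFold_eq (tags : List String) (lowered : List Char) (n : Nat) (hn : n ≤ lowered.length) :
    ∀ b : Nat,
      tags.foldl (fun b tag => max b (pvGB (fun m => decide (tag.toList.take m = lowered.drop (lowered.length - m))) (min n tag.toList.length))) b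
      = max b (pvGB (fun m => tags.any
            (fun tag => decide (tag.toList.take m = lowered.drop (lowered.length - m)))) n) := by
  induction tags with
  | nil => intro b; simp [List.foldl, pvGB_false]
  | cons t ts ih =>
    intro b
    simp only [List.foldl, ih]
    rw [max_assoc]
    congr 1
    -- max (gb for t) (gb for ts) = gb for (t :: ts)
    apply le_antisymm
    · apply max_le
      · rcases pvGB_spec (fun m => decide (t.toList.take m = lowered.drop (lowered.length - m))) (min n t.toList.length) with h0 | hf
        · omega
        · set g := pvGB (fun m => decide (t.toList.take m = lowered.drop (lowered.length - m))) (min n t.toList.length) with hg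
          by_cases hz : g = 0
          · omega
          · apply pvGB_ge _ _ _ (by omega)
              (le_trans (pvGB_le _ _) (by omega))
            simp only [List.any_cons, Bool.or_eq_true]
            exact Or.inl hf
      · rcases pvGB_spec (fun m => ts.any (fun tag => decide (tag.toList.take m = lowered.drop (lowered.length - m)))) n with h0 | hf
        · omega
        · set g := pvGB (fun m => ts.any (fun tag => decide (tag.toList.take m = lowered.drop (lowered.length - m)))) n with hg
          by_cases hz : g = 0
          · omega
          · apply pvGB_ge _ _ _ (by omega) (pvGB_le _ _)
            simp only [List.any_cons, Bool.or_eq_true]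
            exact Or.inr hf
    · rcases pvGB_spec (fun m => (t :: ts).any (fun tag => decide (tag.toList.take m = lowered.drop (lowered.length - m)))) n with h0 | hf
      · omega
      · set g := pvGB (fun m => (t :: ts).any (fun tag => decide (tag.toList.take m = lowered.drop (lowered.length - m)))) n with hg
        by_cases hz : g = 0
        · omega
        · have hgn : g ≤ n := pvGB_le _ _
          simp only [List.any_cons, Bool.or_eq_true, decide_eq_true_eq] at hf
          rcases hf with hf | hf
          · have hlen : g ≤ t.toList.length :=
              pvMatch_len _ _ _ (by omega) (by omega) hf
            exact le_max_of_le_left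
              (pvGB_ge _ _ _ (by omega) (by omega) (by simpa using hf))
          · exact le_max_of_le_right (pvGB_ge _ _ _ (by omega) hgn (by simpa using hf))

theorem pvLower_length (s : List Char) : (PySem.Chars.lower s).length = s.length := by
  simp [PySem.Chars.lower]

-- ===== VERDICT (by name: the statement is the Claim_ definition above) =====
theorem split_partial_tag_suffix_py_spec : Claim_equal_split_partial_tag_suffix_py := by
  intro text candidate_tags _
  show split_partial_tag_suffix_py text candidate_tags = split_partial_tag_suffix_py_alt text candidate_tags
  unfold split_partial_tag_suffix_py split_partial_tag_suffix_py_alt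
  by_cases he : text.toList = []
  · simp [he]
  · simp only [he, ite_false]
    set cap : Int := min (text.toList.length : Int)
      (((candidate_tags.map (fun t => (t.toList.length : Int))).max?).getD 0 - 1) with hcap
    set lowered := PySem.Chars.lower text.toList with hlow
    set n := cap.toNat with hn
    have hnlen : n ≤ lowered.length := by
      rw [pvLower_length]
      have : cap ≤ (text.toList.length : Int) := min_le_left _ _
      omega
    have hmin : ∀ t : String, (min cap (t.toList.length : Int)).toNat = min n t.toList.length := by
      intro t
      rw [hn]; omega
    rw [pvALoop_eq]
    have hcongr : pvGB (fun m => candidate_tags.any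
          (fun tag => PySem.Chars.startswith tag.toList (lowered.drop (lowered.length - m)))) n
        = pvGB (fun m => candidate_tags.any
          (fun tag => decide (tag.toList.take m = lowered.drop (lowered.length - m)))) n := by
      apply pvGB_congr
      intro m h1 h2
      congr 1
      funext tag
      exact pvTest_iff tag.toList lowered m h1 (by omega)
    rw [hcongr]
    have hfold : candidate_tags.foldl
        (fun b tag => max b (pvTagBest tag.toList lowered (min cap (tag.toList.length : Int)).toNat)) 0
        = pvGB (fun m => candidate_tags.any
            (fun tag => decide (tag.toList.take m = lowered.drop (lowered.length - m)))) n := by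
      have : ∀ tag : String, pvTagBest tag.toList lowered (min cap (tag.toList.length : Int)).toNat
          = pvGB (fun m => decide (tag.toList.take m = lowered.drop (lowered.length - m))) (min n tag.toList.length) := by
        intro tag; rw [hmin tag, pvTagBest_eq]
      simp only [this]
      simpa using pvFold_eq candidate_tags lowered n hnlen 0
    rw [hfold]
    rcases Nat.eq_zero_or_pos (pvGB (fun m => candidate_tags.any
        (fun tag => decide (tag.toList.take m = lowered.drop (lowered.length - m)))) n) with h0 | hpos
    · simp [h0]
    · simp [hpos, Nat.ne_of_gt hpos]
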